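-- pv_equiv track=rewrite | github.com/wallberg/sandbox-go | com/github/wallberg/taocp/Commafree.py | exercise35
-- ===== SOURCE A (Python) =====
-- from itertools import product
--
-- def exercise35(word, words, n=None):
--     '''
--     Test if word is commafree with respect to the accepted words of size m
--     '''
--
--     if n is None:
--         n = len(word)
--
--     test_words = set(words + [word])
--     for test1, test2 in product(test_words, test_words):
--         testseq = test1 + test2
--
--         for start in [0, 1]:
--             count = 0
--             for i in range(0, n):
--                 if testseq[start+i:start+i+n] in test_words:
--                     count += 1
--             if count > 1:
--                 return False
--
--     return True
-- ===== SOURCE B (Python) =====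
-- def exercise35(word, words, n=None):
--     # One scan of positions 0..n per concatenation (instead of two counting
--     # passes per start), then an arithmetic test on the hit positions.
--     if n is None:
--         n = len(word)
--     tw = set(words)
--     tw.add(word)
--     for t1 in tw:
--         for t2 in tw:
--             seq = t1 + t2
--             hits = [p for p in range(n + 1) if seq[p:p + n] in tw]
--             if len(hits) >= 3 or (len(hits) == 2 and hits != [0, n]):
--                 return False
--     return True
-- ===== Notes on version B (the rewrite author's own statement) =====
-- stated objective: alternative
-- what changed: Per concatenation, B replaces A's two separate counting passes (one per start offset) with a single filter over the n+1 cut positions followed by an arithmetic test on the resulting hit list (>=3 hits, or exactly 2 hits other than {0,n}).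
import Mathlib
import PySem

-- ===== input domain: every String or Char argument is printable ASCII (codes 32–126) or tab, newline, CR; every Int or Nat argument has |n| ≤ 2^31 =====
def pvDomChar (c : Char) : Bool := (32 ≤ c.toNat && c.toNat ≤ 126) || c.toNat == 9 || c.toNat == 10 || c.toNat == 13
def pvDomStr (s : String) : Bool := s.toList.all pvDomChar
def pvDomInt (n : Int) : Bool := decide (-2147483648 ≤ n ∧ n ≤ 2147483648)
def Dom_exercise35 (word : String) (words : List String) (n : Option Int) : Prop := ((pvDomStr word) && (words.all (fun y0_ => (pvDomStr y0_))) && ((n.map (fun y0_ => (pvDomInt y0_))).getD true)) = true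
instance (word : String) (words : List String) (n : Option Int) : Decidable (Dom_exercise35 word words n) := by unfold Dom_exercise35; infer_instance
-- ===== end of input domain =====

-- B changes the pair check: one scan of the n+1 cut positions per concatenation plus an
-- arithmetic test on the hit list, instead of two separate counting passes per start (objective: alternative).
-- Strings are handled as List Char via String.toList (exact; PySem slices are defined on code points).

-- ===== PORT A =====
/-- count = 0; for i in range(0,n): if testseq[start+i:start+i+n] in test_words: count += 1 -/
def pvCountA (tw : PySem.Set (List Char)) (nv : Int) (seq : List Char) (s : Int) : Int :=
  (PySem.List.pyRange 0 nv 1).foldl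
    (fun count i =>
      if PySem.List.slice seq (some (s + i)) (some (s + i + nv)) ∈ tw then count + 1 else count) 0

/-- for test1, test2 in product(test_words, test_words): … (early return False) -/
def pvLoopA (tw : PySem.Set (List Char)) (nv : Int) : List (List Char × List Char) → Bool
  | [] => true
  | (t1, t2) :: rest =>
    let testseq := t1 ++ t2
    if pvCountA tw nv testseq 0 > 1 then false
    else if pvCountA tw nv testseq 1 > 1 then false
    else pvLoopA tw nv rest

def exercise35 (word : String) (words : List String) (n : Option Int) : Bool :=
  let nv : Int := match n with
    | none => PySem.Str.len word
    | some v => v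
  let tw : PySem.Set (List Char) := PySem.Set.ofList ((words ++ [word]).map String.toList)
  pvLoopA tw nv (tw.flatMap (fun t1 => tw.map (fun t2 => (t1, t2))))

-- ===== PORT B =====
/-- hits = [p for p in range(n+1) if seq[p:p+n] in tw]; bad iff len>=3 or (len==2 and hits != [0,n]) -/
def pvBadB (tw : PySem.Set (List Char)) (nv : Int) (seq : List Char) : Bool :=
  let hits := (PySem.List.pyRange 0 (nv + 1) 1).filter
    (fun p => decide (PySem.List.slice seq (some p) (some (p + nv)) ∈ tw))
  hits.length ≥ 3 || (hits.length == 2 && hits ≠ [0, nv])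

/-- inner: for t2 in tw: … (early return False) -/
def pvInnerB (tw : PySem.Set (List Char)) (nv : Int) (t1 : List Char) : List (List Char) → Bool
  | [] => true
  | t2 :: rest =>
    if pvBadB tw nv (t1 ++ t2) then false else pvInnerB tw nv t1 rest

/-- outer: for t1 in tw: … -/
def pvOuterB (tw : PySem.Set (List Char)) (nv : Int) : List (List Char) → Bool
  | [] => true
  | t1 :: rest =>
    if pvInnerB tw nv t1 tw then pvOuterB tw nv rest else false

def exercise35_alt (word : String) (words : List String) (n : Option Int) : Bool :=
  let nv : Int := match n with
    | none => PySem.Str.len word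
    | some v => v
  let tw : PySem.Set (List Char) := PySem.Set.add (PySem.Set.ofList (words.map String.toList)) word.toList
  pvOuterB tw nv tw

-- ===== PRECONDITION & SPEC =====
def Spec_exercise35 (word : String) (words : List String) (n : Option Int) (out : Bool) : Prop := out = exercise35_alt word words n
instance (word : String) (words : List String) (n : Option Int) (out : Bool) : Decidable (Spec_exercise35 word words n out) := by unfold Spec_exercise35; infer_instance

-- ===== CLAIM (what is proved, stated in full; the proofs are below) =====
def Claim_equal_exercise35 : Prop := ∀ (word : String) (words : List String) (n : Option Int), Dom_exercise35 word words n → Spec_exercise35 word words n (exercise35 word words n)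

-- ===== LEMMAS AND PROOFS =====

/-- An if-then-else counting foldl is a countP. -/
lemma pvFoldlCount {p : Int → Prop} [DecidablePred p] (l : List Int) (c : Int) :
    l.foldl (fun count i => if p i then count + 1 else count) c
      = c + (l.countP (fun i => decide (p i)) : Int) := by
  induction l generalizing c with
  | nil => simp
  | cons x xs ih =>
    by_cases h : p x <;> simp [h, ih] <;> omega

/-- A's counting loop is a countP over the range. -/
lemma pvCountA_eq_countP (tw : PySem.Set (List Char)) (nv : Int) (seq : List Char) (s : Int) :
    pvCountA tw nv seq s =
      ((PySem.List.pyRange 0 nv 1).countP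
        (fun i => decide (PySem.List.slice seq (some (s + i)) (some (s + i + nv)) ∈ tw)) : Int) := by
  unfold pvCountA
  rw [pvFoldlCount]
  simp

/-- Abstract core: two counting passes over windows [0,n) and [1,n] versus one
    filter over [0,n] plus the arithmetic test on the hit list. -/
lemma pvCore (f : Int → Bool) (nv : Int) :
    ((PySem.List.pyRange 0 nv 1).countP (fun i => f (0 + i)) > 1 ∨
     (PySem.List.pyRange 0 nv 1).countP (fun i => f (1 + i)) > 1)
    ↔ (((PySem.List.pyRange 0 (nv + 1) 1).filter f).length ≥ 3 ∨
       (((PySem.List.pyRange 0 (nv + 1) 1).filter f).length = 2 ∧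
        (PySem.List.pyRange 0 (nv + 1) 1).filter f ≠ [0, nv])) := by
  by_cases hn : nv ≤ 0
  · rw [PySem.List.pyRange_one_eq_nil hn]
    by_cases hn1 : nv + 1 ≤ 0
    · rw [PySem.List.pyRange_one_eq_nil hn1]; simp
    · have hnv : nv = 0 := by omega
      subst hnv
      have : PySem.List.pyRange 0 (0 + 1) 1 = [0] := PySem.List.pyRange_one_singleton 0
      rw [this]
      rcases hf : f 0 <;> simp [hf]
  · push Not at hn
    set H := (PySem.List.pyRange 0 (nv + 1) 1).filter f with hH
    have hmem : ∀ x ∈ H, f x = true := fun x hx => (List.mem_filter.mp hx).2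
    have hsplit : PySem.List.pyRange 0 (nv + 1) 1 = PySem.List.pyRange 0 nv 1 ++ [nv] :=
      PySem.List.pyRange_one_succ_right (by omega)
    have hcons : PySem.List.pyRange 0 (nv + 1) 1 = 0 :: PySem.List.pyRange 1 (nv + 1) 1 :=
      PySem.List.pyRange_one_cons (by omega)
    -- c0 : the start=0 count is the filter over [0,n)
    have hc0 : (PySem.List.pyRange 0 nv 1).countP (fun i => f (0 + i))
        = ((PySem.List.pyRange 0 nv 1).filter f).length := by
      rw [← List.countP_eq_length_filter]
      exact List.countP_congr (fun a _ => by simp)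
    -- c1 : the start=1 count is the filter over [1,n]
    have hc1 : (PySem.List.pyRange 0 nv 1).countP (fun i => f (1 + i))
        = ((PySem.List.pyRange 1 (nv + 1) 1).filter f).length := by
      rw [← List.countP_eq_length_filter, PySem.List.pyRange_one, PySem.List.pyRange_one,
        List.countP_map, List.countP_map]
      have : ((nv + 1) - 1).toNat = (nv - 0).toNat := by omega
      rw [this]
      exact List.countP_congr (fun a _ => by simp [Function.comp])
    rw [hc0, hc1]
    -- [0,n] = [0,n) ++ [n]  and  [0,n] = 0 :: [1,n]
    rcases hfn : f nv <;> rcases hf0 : f 0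
    · -- f nv = false, f 0 = false
      have hlen1 : H.length = ((PySem.List.pyRange 0 nv 1).filter f).length := by
        rw [hH, hsplit, List.filter_append]; simp [hfn]
      have hlen2 : H.length = ((PySem.List.pyRange 1 (nv + 1) 1).filter f).length := by
        rw [hH, hcons]; simp [hf0]
      constructor
      · rintro (ha | hb)
        · by_cases h3 : 3 ≤ H.length
          · exact Or.inl h3
          · refine Or.inr ⟨by omega, fun hEq => ?_⟩
            have := hmem nv (by rw [hEq]; simp)
            rw [hfn] at this; exact Bool.false_ne_true this
        · by_cases h3 : 3 ≤ H.length
          · exact Or.inl h3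
          · refine Or.inr ⟨by omega, fun hEq => ?_⟩
            have := hmem 0 (by rw [hEq]; simp)
            rw [hf0] at this; exact Bool.false_ne_true this
      · rintro (h3 | ⟨h2, hne⟩) <;> [left; left] <;> omega
    · -- f nv = false, f 0 = true
      have hlen1 : H.length = ((PySem.List.pyRange 0 nv 1).filter f).length := by
        rw [hH, hsplit, List.filter_append]; simp [hfn]
      have hlen2 : H.length = 1 + ((PySem.List.pyRange 1 (nv + 1) 1).filter f).length := by
        rw [hH, hcons]; simp [hf0]; omega
      constructor
      · rintro (ha | hb)
        · by_cases h3 : 3 ≤ H.length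
          · exact Or.inl h3
          · refine Or.inr ⟨by omega, fun hEq => ?_⟩
            have := hmem nv (by rw [hEq]; simp)
            rw [hfn] at this; exact Bool.false_ne_true this
        · exact Or.inl (by omega)
      · rintro (h3 | ⟨h2, hne⟩) <;> [left; left] <;> omega
    · -- f nv = true, f 0 = false
      have hlen1 : H.length = ((PySem.List.pyRange 0 nv 1).filter f).length + 1 := by
        rw [hH, hsplit, List.filter_append]; simp [hfn]
      have hlen2 : H.length = ((PySem.List.pyRange 1 (nv + 1) 1).filter f).length := by
        rw [hH, hcons]; simp [hf0]
      constructor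
      · rintro (ha | hb)
        · exact Or.inl (by omega)
        · by_cases h3 : 3 ≤ H.length
          · exact Or.inl h3
          · refine Or.inr ⟨by omega, fun hEq => ?_⟩
            have := hmem 0 (by rw [hEq]; simp)
            rw [hf0] at this; exact Bool.false_ne_true this
      · rintro (h3 | ⟨h2, hne⟩) <;> [right; right] <;> omega
    · -- f nv = true, f 0 = true
      have hlen1 : H.length = ((PySem.List.pyRange 0 nv 1).filter f).length + 1 := by
        rw [hH, hsplit, List.filter_append]; simp [hfn]
      have hlen2 : H.length = 1 + ((PySem.List.pyRange 1 (nv + 1) 1).filter f).length := by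
        rw [hH, hcons]; simp [hf0]; omega
      constructor
      · rintro (ha | hb) <;> exact Or.inl (by omega)
      · rintro (h3 | ⟨h2, hne⟩)
        · left; omega
        · exfalso
          have hlenfr : ((PySem.List.pyRange 0 nv 1).filter f).length = 1 := by omega
          obtain ⟨x, hx⟩ := List.length_eq_one_iff.mp hlenfr
          have hHsplit : H = [x, nv] := by
            rw [hH, hsplit, List.filter_append, hx]; simp [hfn]
          have hHcons : H = 0 :: (PySem.List.pyRange 1 (nv + 1) 1).filter f := by
            rw [hH, hcons]; simp [hf0]
          rw [hHsplit] at hHcons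
          have hx0 : x = 0 := (List.cons_eq_cons.mp hHcons).1
          exact hne (by rw [hHsplit, hx0])

/-- The heart: A's per-pair test equals B's per-pair test. -/
lemma pvBad_eq (tw : PySem.Set (List Char)) (nv : Int) (seq : List Char) :
    (pvCountA tw nv seq 0 > 1 ∨ pvCountA tw nv seq 1 > 1) ↔ pvBadB tw nv seq = true := by
  rw [pvCountA_eq_countP, pvCountA_eq_countP]
  unfold pvBadB
  simp only [gt_iff_lt, Nat.one_lt_cast, Bool.or_eq_true, Bool.and_eq_true,
    decide_eq_true_eq, beq_iff_eq, ge_iff_le, ne_eq]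
  exact pvCore (fun p => decide (PySem.List.slice seq (some p) (some (p + nv)) ∈ tw)) nv

lemma pvLoopA_append (tw : PySem.Set (List Char)) (nv : Int) (xs ys : List (List Char × List Char)) :
    pvLoopA tw nv (xs ++ ys) = (pvLoopA tw nv xs && pvLoopA tw nv ys) := by
  induction xs with
  | nil => simp [pvLoopA]
  | cons p xs ih =>
    obtain ⟨t1, t2⟩ := p
    simp only [List.cons_append, pvLoopA]
    split_ifs <;> simp [ih]

lemma pvLoopA_map_eq_inner (tw : PySem.Set (List Char)) (nv : Int) (t1 : List Char)
    (ts : List (List Char)) :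
    pvLoopA tw nv (ts.map (fun t2 => (t1, t2))) = pvInnerB tw nv t1 ts := by
  induction ts with
  | nil => rfl
  | cons t2 rest ih =>
    simp only [List.map_cons, pvLoopA, pvInnerB]
    by_cases h : pvBadB tw nv (t1 ++ t2) = true
    · have : pvCountA tw nv (t1 ++ t2) 0 > 1 ∨ pvCountA tw nv (t1 ++ t2) 1 > 1 :=
        (pvBad_eq tw nv (t1 ++ t2)).mpr h
      rcases this with h0 | h1
      · simp [h0, h]
      · by_cases h0 : pvCountA tw nv (t1 ++ t2) 0 > 1 <;> simp [h0, h1, h]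
    · have hno : ¬ (pvCountA tw nv (t1 ++ t2) 0 > 1 ∨ pvCountA tw nv (t1 ++ t2) 1 > 1) := by
        intro hc; exact h ((pvBad_eq tw nv (t1 ++ t2)).mp hc)
      push Not at hno
      simp [not_lt.mpr hno.1, not_lt.mpr hno.2, h, ih]

lemma pvLoopA_eq_outer (tw : PySem.Set (List Char)) (nv : Int) (ts : List (List Char)) :
    pvLoopA tw nv (ts.flatMap (fun t1 => tw.map (fun t2 => (t1, t2)))) = pvOuterB tw nv ts := by
  induction ts with
  | nil => rfl
  | cons t1 rest ih =>
    simp only [List.flatMap_cons, pvOuterB]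
    rw [pvLoopA_append, pvLoopA_map_eq_inner tw nv t1 tw, ih]
    split_ifs with h <;> simp [h]

lemma pvSets_eq (word : String) (words : List String) :
    PySem.Set.ofList ((words ++ [word]).map String.toList)
      = PySem.Set.add (PySem.Set.ofList (words.map String.toList)) word.toList := by
  rw [List.map_append, List.map_singleton, PySem.Set.ofList_append_singleton]

-- ===== VERDICT (by name: the statement is the Claim_ definition above) =====
theorem exercise35_spec : Claim_equal_exercise35 := by
  intro word words n _
  unfold Spec_exercise35 exercise35 exercise35_alt
  rw [pvSets_eq]
  exact pvLoopA_eq_outer _ _ _
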